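-- pv_equiv track=rewrite | github.com/pioneeryan/AR-Anomaly-Detection | AR.py | resample
-- ===== SOURCE A (Python) =====
-- def resample(data, period):
--     length = len(data)
--     result = []
--     for i in range(period):
--         result.append([])
--     for i in range(length):
--         r = i%period
--         result[r].append(data[i])
--     return tuple(result)
-- ===== SOURCE B (Python) =====
-- def resample(data, period):
--     return tuple(list(data[r::period]) for r in range(period))
-- ===== Notes on version B (the rewrite author's own statement) =====
-- stated objective: idiomatic
-- what changed: B builds each period bucket directly with a strided slice data[r::period] instead of A's allocate-then-route pass over every index with i%period.
import Mathlib
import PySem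

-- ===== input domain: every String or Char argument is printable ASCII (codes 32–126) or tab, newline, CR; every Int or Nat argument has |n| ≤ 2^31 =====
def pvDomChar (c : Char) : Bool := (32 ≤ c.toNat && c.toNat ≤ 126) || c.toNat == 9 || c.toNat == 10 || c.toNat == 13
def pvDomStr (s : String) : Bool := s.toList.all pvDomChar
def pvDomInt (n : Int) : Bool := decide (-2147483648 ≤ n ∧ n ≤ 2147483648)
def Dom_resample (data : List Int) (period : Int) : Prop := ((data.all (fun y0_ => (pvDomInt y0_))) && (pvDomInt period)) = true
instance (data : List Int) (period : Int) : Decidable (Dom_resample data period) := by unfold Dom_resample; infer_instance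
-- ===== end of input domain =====

-- B replaces A's allocate-then-route pass (i%period routing) with one strided slice per bucket (idiomatic; equal cost).

-- ===== PORT A =====
def resample (data : List Int) (period : Int) : List (List Int) :=
  let length : Int := (data.length : Int)
  let result : List (List Int) :=
    (PySem.List.pyRange 0 period 1).foldl (fun res _ => res ++ [[]]) []
  (PySem.List.pyRange 0 length 1).foldl (fun res i =>
    match PySem.Int.mod? i period with
    | none => res   -- Python raises ZeroDivisionError here (period = 0 with data nonempty); outside Pre_
    | some r =>
      -- result[r].append(data[i]); for r out of range Python raises IndexError (period < 0), outside Pre_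
      PySem.List.pySetD res r ((PySem.List.pyGetD res r []) ++ [PySem.List.pyGetD data i 0]))
    result

-- ===== PORT B =====
def resample_alt (data : List Int) (period : Int) : List (List Int) :=
  (PySem.List.pyRange 0 period 1).map
    (fun r => (PySem.List.slice? data (some r) none period).getD [])

-- ===== PRECONDITION & SPEC =====
-- Pre_ excludes exactly the inputs on which A raises: period ≤ 0 with nonempty data
-- (ZeroDivisionError for period = 0, IndexError for negative period).
def Pre_resample (data : List Int) (period : Int) : Prop := 0 < period ∨ data = []
instance (data : List Int) (period : Int) : Decidable (Pre_resample data period) := by unfold Pre_resample; infer_instance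
def pvWitness_resample : List Int × Int := ([1, 2, 3, 4, 5], 2)

def Spec_resample (data : List Int) (period : Int) (out : List (List Int)) : Prop := out = resample_alt data period
instance (data : List Int) (period : Int) (out : List (List Int)) : Decidable (Spec_resample data period out) := by unfold Spec_resample; infer_instance

-- ===== CLAIM (what is proved, stated in full; the proofs are below) =====
def Claim_equal_resample : Prop := ∀ (data : List Int) (period : Int), Dom_resample data period → Pre_resample data period → Spec_resample data period (resample data period)

-- ===== LEMMAS AND PROOFS =====

-- The common characterisation: bucket r of period-p resampling of data (p > 0, r < p).
def pvBucket (data : List Int) (p r : Nat) : List Int :=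
  ((List.range data.length).filter (fun i => i % p == r)).map (fun i => data.getD i 0)

-- A's first loop builds p empty buckets.
theorem pv_foldl_append_nil {α β : Type} (l : List α) (init : List (List β)) :
    l.foldl (fun res _ => res ++ [[]]) init = init ++ List.replicate l.length [] := by
  induction l generalizing init with
  | nil => simp
  | cons x xs ih =>
      rw [List.foldl_cons, ih, List.length_cons, List.append_assoc,
          List.singleton_append, ← List.replicate_succ, List.replicate_succ']

theorem pv_set_map_range {β : Type} (p q : Nat) (f : Nat → β) (v : β) (hq : q < p) :
    ((List.range p).map f).set q v
      = (List.range p).map (fun r => if r = q then v else f r) := by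
  apply List.ext_getElem
  · simp
  · intro i h1 h2
    rw [List.getElem_set]
    by_cases h : i = q
    · subst h; simp
    · simp [h, Ne.symm h]

theorem pv_mod_eq_iff_dvd (p r n : Nat) (hp : 0 < p) (hr : r < p) (hn : r ≤ n) :
    n % p = r ↔ p ∣ (n - r) := by
  constructor
  · intro h
    refine ⟨n / p, ?_⟩
    have := Nat.div_add_mod n p
    omega
  · rintro ⟨k, hk⟩
    have hnk : n = p * k + r := by omega
    rw [hnk, Nat.mul_add_mod, Nat.mod_eq_of_lt hr]

-- index-list lemma: strided indices = filtered range
theorem pv_stride_filter (p r n : Nat) (hp : 0 < p) (hr : r < p) :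
    (List.range n).filter (fun i => i % p == r)
      = (List.range ((n - r + p - 1) / p)).map (fun k => r + p * k) := by
  induction n with
  | zero =>
    rw [List.range_zero, List.filter_nil,
        show (0 - r + p - 1) / p = 0 from Nat.div_eq_of_lt (by omega)]
    simp
  | succ n ih =>
    rw [List.range_succ, List.filter_append, ih]
    by_cases h : n % p = r
    · have hrn : r ≤ n := by
        have := Nat.mod_le n p; omega
      obtain ⟨k, hk⟩ := (pv_mod_eq_iff_dvd p r n hp hr hrn).1 h
      have hn : n = p * k + r := by omega
      have e1 : n - r + p - 1 = p * k + (p - 1) := by omega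
      have e2 : n + 1 - r + p - 1 = p * k + p := by omega
      have c1 : (n - r + p - 1) / p = k := by
        rw [e1, Nat.mul_add_div hp, Nat.div_eq_of_lt (by omega)]; omega
      have c2 : (n + 1 - r + p - 1) / p = k + 1 := by
        rw [e2, Nat.mul_add_div hp, Nat.div_self hp]
      rw [c1, c2, List.range_succ, List.map_append]
      congr 1
      simp [List.filter, h]
      omega
    · have hc : (n + 1 - r + p - 1) / p = (n - r + p - 1) / p := by
        by_cases hrn : r ≤ n
        · have hnd : ¬ p ∣ (n - r) := fun hd => h ((pv_mod_eq_iff_dvd p r n hp hr hrn).2 hd)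
          have ha : 1 ≤ n - r ∨ n = r := by omega
          have ha1 : 1 ≤ n - r := by
            rcases ha with h1 | h1
            · exact h1
            · exfalso; apply hnd; simp [h1]
          have e3 : n + 1 - r + p - 1 = (n - r - 1 + p) + 1 := by omega
          have e4 : n - r + p - 1 = (n - r - 1) + p := by omega
          have hdvd : ¬ p ∣ (n - r - 1 + p) + 1 := by
            rw [show (n - r - 1 + p) + 1 = (n - r) + p by omega, Nat.dvd_add_self_right]
            exact hnd
          have h5 : (n - r - 1 + p) / p = (n - r - 1) / p + 1 := Nat.add_div_right _ hp
          rw [e3, Nat.succ_div, if_neg hdvd, e4, h5, Nat.add_zero]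
        · have e5 : n + 1 - r + p - 1 = p - 1 := by omega
          have e6 : n - r + p - 1 = p - 1 := by omega
          rw [e5, e6]
      rw [hc]
      have hb : ((n % p == r) : Bool) = false := by simp [h]
      simp [List.filter, hb]

-- turn a never-failing filterMap into a map
theorem pv_filterMap_eq_map {α β : Type} (l : List α) (f : α → Option β) (g : α → β)
    (h : ∀ a ∈ l, f a = some (g a)) : l.filterMap f = l.map g := by
  induction l with
  | nil => rfl
  | cons x xs ih =>
    rw [List.filterMap_cons, h x (by simp), List.map_cons, ih (fun a ha => h a (by simp [ha]))]

theorem pv_stride_lt (p r n k : Nat) (hp : 0 < p) (hrn : r < n)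
    (hk : k < (n - r + p - 1) / p) : r + p * k < n := by
  have h2 : p * (k + 1) ≤ p * ((n - r + p - 1) / p) := Nat.mul_le_mul (le_refl p) (by omega)
  have h3 : p * ((n - r + p - 1) / p) ≤ n - r + p - 1 := Nat.mul_div_le _ _
  have h4 : p * (k + 1) = p * k + p := by ring
  omega

-- B's bucket characterised.
theorem pvB_bucket (data : List Int) (p r : Nat) (hp : 0 < p) (hr : r < p) :
    (PySem.List.slice? data (some (r : Int)) none (p : Int)).getD []
      = pvBucket data p r := by
  have hp0 : ((p : Nat) : Int) ≠ 0 := by exact_mod_cast hp.ne'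
  have hpneg : ¬ ((p : Nat) : Int) < 0 := by omega
  have hrneg : ¬ ((r : Nat) : Int) < 0 := by omega
  rw [PySem.List.slice?]
  rw [if_neg hp0]
  simp only [PySem.List.sliceIndices, if_neg hpneg, if_pos (by exact_mod_cast hp : (0:Int) < p)]
  by_cases hrn : r < data.length
  · have hmin : min ((r : Nat) : Int) ((data.length : Nat) : Int) = ((r : Nat) : Int) := by
      apply min_eq_left; exact_mod_cast hrn.le
    have hlt : ((r : Nat) : Int) < ((data.length : Nat) : Int) := by exact_mod_cast hrn
    rw [if_neg hrneg, hmin, if_pos hlt]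
    have hcast : ((data.length : Int) - (r : Int) + (p : Int) - 1)
        = ((data.length - r + p - 1 : Nat) : Int) := by push_cast; omega
    have hcnt : (((data.length : Int) - (r : Int) + (p : Int) - 1) / (p : Int)).toNat
        = (data.length - r + p - 1) / p := by
      rw [hcast, ← Int.natCast_div, Int.toNat_natCast]
    rw [hcnt, Option.getD_some]
    rw [pv_filterMap_eq_map _ _ (fun k => data.getD (r + p * k) 0) ?_]
    · rw [pvBucket, pv_stride_filter p r data.length hp hr, List.map_map]
      rfl
    · intro k hk
      rw [List.mem_range] at hk
      have hik : r + p * k < data.length := pv_stride_lt p r data.length k hp hrn hk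
      have : (((r : Nat) : Int) + ((p : Nat) : Int) * ((k : Nat) : Int)).toNat = r + p * k := by
        push_cast; omega
      rw [this]
      simp [List.getElem?_eq_getElem hik]
  · have hmin : min ((r : Nat) : Int) ((data.length : Nat) : Int) = ((data.length : Nat) : Int) := by
      apply min_eq_right; exact_mod_cast (by omega : data.length ≤ r)
    rw [if_neg hrneg, hmin, if_neg (by omega : ¬ ((data.length : Nat) : Int) < ((data.length : Nat) : Int))]
    rw [Option.getD_some, List.range_zero, List.filterMap_nil, pvBucket]
    rw [List.filter_eq_nil_iff.2, List.map_nil]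
    intro i hi
    rw [List.mem_range] at hi
    have := Nat.mod_le i p
    simp only [beq_iff_eq]
    omega

-- A's main loop characterised.
theorem pvA_loop (data : List Int) (p : Nat) (hp : 0 < p) (n : Nat) (hn : n ≤ data.length) :
    (PySem.List.pyRange 0 (n : Int) 1).foldl (fun res i =>
      match PySem.Int.mod? i (p : Int) with
      | none => res
      | some r =>
        PySem.List.pySetD res r ((PySem.List.pyGetD res r []) ++ [PySem.List.pyGetD data i 0]))
      (List.replicate p [])
    = (List.range p).map (fun r =>
        ((List.range n).filter (fun i => i % p == r)).map (fun i => data.getD i 0)) := by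
  induction n with
  | zero =>
    rw [show ((0 : Nat) : Int) = 0 from rfl, PySem.List.pyRange_one_eq_nil (le_refl 0),
        List.foldl_nil]
    apply List.ext_getElem
    · simp
    · intro i h1 h2
      simp
  | succ n ih =>
    have hn' : n ≤ data.length := by omega
    have hm : PySem.Int.mod? ((n : Nat) : Int) ((p : Nat) : Int) = some (((n % p : Nat) : Int)) := by
      have hp0 : ((p : Nat) : Int) ≠ 0 := by exact_mod_cast hp.ne'
      rw [PySem.Int.mod?, if_neg hp0, Int.fmod_eq_emod,
          if_pos (Or.inl (by positivity : (0:Int) ≤ ((p : Nat) : Int)))]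
      push_cast
      simp
    rw [show (((n + 1 : Nat)) : Int) = ((n : Nat) : Int) + 1 by push_cast; ring,
        PySem.List.pyRange_one_succ_right (by positivity), List.foldl_append, ih hn',
        List.foldl_cons, List.foldl_nil, hm]
    dsimp only
    have hmod : n % p < p := Nat.mod_lt n hp
    rw [PySem.List.pyGetD_natCast, PySem.List.pySetD_natCast, PySem.List.pyGetD_natCast,
        PySem.List.getD_map_range _ _ _ _ hmod, pv_set_map_range p (n % p) _ _ hmod]
    apply List.map_congr_left
    intro r hr
    rw [List.range_succ, List.filter_append, List.map_append]
    by_cases h : r = n % p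
    · subst h
      simp [List.filter]
    · have hb : ((n % p == r) : Bool) = false := by
        simp only [beq_eq_false_iff_ne, ne_eq]
        exact fun hh => h hh.symm
      simp [List.filter, hb, h]

-- ===== VERDICT (by name: the statement is the Claim_ definition above) =====
theorem resample_spec : Claim_equal_resample := by
  intro data period _ hpre
  unfold Spec_resample
  by_cases hp : 0 < period
  · set p := period.toNat with hpdef
    have hP : ((p : Nat) : Int) = period := Int.toNat_of_nonneg hp.le
    have hpp : 0 < p := by omega
    simp only [resample, resample_alt, ← hP]
    rw [pv_foldl_append_nil, List.nil_append,
        PySem.List.length_pyRange_one]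
    rw [show ((p : Int) - 0).toNat = p by omega]
    rw [pvA_loop data p hpp data.length (le_refl _)]
    rw [PySem.List.pyRange_one, show ((p : Int) - 0).toNat = p by omega, List.map_map]
    apply List.map_congr_left
    intro r hr
    rw [List.mem_range] at hr
    show _ = (PySem.List.slice? data (some (0 + (r : Int))) none (p : Int)).getD []
    rw [zero_add, pvB_bucket data p r hpp hr, pvBucket]
  · have hd : data = [] := by
      rcases hpre with h | h
      · exact absurd h hp
      · exact h
    subst hd
    simp only [resample, resample_alt]
    have h0 : PySem.List.pyRange 0 period 1 = [] :=
      PySem.List.pyRange_one_eq_nil (by omega)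
    have h1 : PySem.List.pyRange 0 ((List.length ([] : List Int) : Int)) 1 = [] :=
      PySem.List.pyRange_one_eq_nil (by simp)
    simp [resample, resample_alt, h0, h1]
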